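-- pv_equiv track=rewrite | github.com/kevin866/Robot_learning_project_2 | action_seq_gene.py | generate_robot_action_sequence
-- ===== SOURCE A (Python) =====
-- def generate_robot_action_sequence(hand_events):
--     """Generates the robot arm's action sequence based on hand events."""
--
--     # Iterate over the hand events and generate actions
--     sequence = []
--
--     # Make sure the hand_events have an equal number of "close" and "open" events
--     max_len = max(len(hand_events['close']), len(hand_events['open']))
--     for i in range(max_len):
--         if i < len(hand_events['close']):
--             close_x, close_y = hand_events['close'][i]
--             sequence.append(f"Move to grasp position ({close_x}, {close_y})")
--             sequence.append("Grasp")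
--
--
--         if i < len(hand_events['open']):
--             open_x, open_y = hand_events['open'][i]
--             sequence.append(f"Move to release position ({open_x}, {open_y})")
--             sequence.append('Release')
--
--
--     return sequence
-- ===== SOURCE B (Python) =====
-- def generate_robot_action_sequence(hand_events):
--     """Generates the robot arm's action sequence based on hand events."""
--     # Build the two action tables first, then merge them in a separate pass.
--     close_actions = [[f"Move to grasp position ({x}, {y})", "Grasp"]
--                      for (x, y) in hand_events['close']]
--     open_actions = [[f"Move to release position ({x}, {y})", "Release"]
--                     for (x, y) in hand_events['open']]
--     k = min(len(close_actions), len(open_actions))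
--     sequence = []
--     for c, o in zip(close_actions, open_actions):
--         sequence += c
--         sequence += o
--     for tail in close_actions[k:]:
--         sequence += tail
--     for tail in open_actions[k:]:
--         sequence += tail
--     return sequence
-- ===== Notes on version B (the rewrite author's own statement) =====
-- stated objective: alternative
-- what changed: B first builds the two per-event action tables with comprehensions and then merges them in a separate pass (zip over the paired prefix plus the leftover tail slices), replacing A's single index-driven loop that re-checks both list lengths at every index.
import Mathlib
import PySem

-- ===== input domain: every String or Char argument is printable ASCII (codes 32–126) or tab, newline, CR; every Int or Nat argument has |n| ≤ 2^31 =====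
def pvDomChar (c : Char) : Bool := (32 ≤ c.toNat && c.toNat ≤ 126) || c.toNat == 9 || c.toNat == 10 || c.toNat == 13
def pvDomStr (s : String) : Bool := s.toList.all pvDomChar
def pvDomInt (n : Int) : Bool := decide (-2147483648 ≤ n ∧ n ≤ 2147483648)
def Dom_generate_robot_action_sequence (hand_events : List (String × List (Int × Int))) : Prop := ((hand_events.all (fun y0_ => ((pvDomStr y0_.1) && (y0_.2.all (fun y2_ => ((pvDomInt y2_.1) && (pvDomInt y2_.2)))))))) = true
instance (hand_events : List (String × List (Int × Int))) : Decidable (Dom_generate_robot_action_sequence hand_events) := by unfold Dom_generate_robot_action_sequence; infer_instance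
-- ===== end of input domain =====

-- B builds the two per-event action tables first and merges them in a separate pass
-- (zip + leftover tails) instead of A's single index-driven interleave; objective: alternative decomposition.

-- ===== PORT A =====
-- f"Move to grasp position ({x}, {y})" / f"Move to release position ({x}, {y})"
def pvGraspStr (p : Int × Int) : String :=
  "Move to grasp position (" ++ PySem.Int.toStr p.1 ++ ", " ++ PySem.Int.toStr p.2 ++ ")"
def pvReleaseStr (p : Int × Int) : String :=
  "Move to release position (" ++ PySem.Int.toStr p.1 ++ ", " ++ PySem.Int.toStr p.2 ++ ")"

def generate_robot_action_sequence (hand_events : List (String × List (Int × Int))) : List String :=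
  match hand_events.lookup "close", hand_events.lookup "open" with
  | some closeEv, some openEv =>
    let maxLen : Int := max (closeEv.length : Int) (openEv.length : Int)
    (PySem.List.pyRange 0 maxLen 1).foldl (fun seq i =>
      let seq := if i < (closeEv.length : Int) then
          seq ++ [pvGraspStr (PySem.List.pyGetD closeEv i (0, 0))] ++ ["Grasp"]
        else seq
      if i < (openEv.length : Int) then
          seq ++ [pvReleaseStr (PySem.List.pyGetD openEv i (0, 0))] ++ ["Release"]
        else seq) []
  | _, _ => []   -- KeyError in Python: excluded by Pre_

-- ===== PORT B =====
-- B's own copies of the two f-string formatters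
def pvGraspStrB (p : Int × Int) : String :=
  "Move to grasp position (" ++ PySem.Int.toStr p.1 ++ ", " ++ PySem.Int.toStr p.2 ++ ")"
def pvReleaseStrB (p : Int × Int) : String :=
  "Move to release position (" ++ PySem.Int.toStr p.1 ++ ", " ++ PySem.Int.toStr p.2 ++ ")"

def generate_robot_action_sequence_alt (hand_events : List (String × List (Int × Int))) : List String :=
  match hand_events.lookup "close" with
  | none => []   -- KeyError in Python: excluded by Pre_
  | some closeEv =>
  match hand_events.lookup "open" with
  | none => []   -- KeyError in Python: excluded by Pre_
  | some openEv =>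
    let close_actions := closeEv.map (fun p => [pvGraspStrB p, "Grasp"])
    let open_actions := openEv.map (fun p => [pvReleaseStrB p, "Release"])
    let k : Int := min (close_actions.length : Int) (open_actions.length : Int)
    let sequence := (close_actions.zip open_actions).foldl (fun s co => s ++ co.1 ++ co.2) []
    let sequence := (PySem.List.slice close_actions (some k) none).foldl (fun s t => s ++ t) sequence
    (PySem.List.slice open_actions (some k) none).foldl (fun s t => s ++ t) sequence

-- ===== PRECONDITION & SPEC =====
-- Pre_ excludes exactly the inputs where Python raises KeyError: a missing 'close' or 'open' key.
def Pre_generate_robot_action_sequence (hand_events : List (String × List (Int × Int))) : Prop :=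
  (hand_events.lookup "close").isSome = true ∧ (hand_events.lookup "open").isSome = true
instance (hand_events : List (String × List (Int × Int))) : Decidable (Pre_generate_robot_action_sequence hand_events) := by unfold Pre_generate_robot_action_sequence; infer_instance

def pvWitness_generate_robot_action_sequence : (List (String × List (Int × Int))) :=
  [("close", [(1, 2), (3, 4)]), ("open", [(5, 6)])]

def Spec_generate_robot_action_sequence (hand_events : List (String × List (Int × Int))) (out : List String) : Prop := out = generate_robot_action_sequence_alt hand_events
instance (hand_events : List (String × List (Int × Int))) (out : List String) : Decidable (Spec_generate_robot_action_sequence hand_events out) := by unfold Spec_generate_robot_action_sequence; infer_instance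

-- ===== CLAIM (what is proved, stated in full; the proofs are below) =====
def Claim_equal_generate_robot_action_sequence : Prop := ∀ (hand_events : List (String × List (Int × Int))), Dom_generate_robot_action_sequence hand_events → Pre_generate_robot_action_sequence hand_events → Spec_generate_robot_action_sequence hand_events (generate_robot_action_sequence hand_events)

-- ===== LEMMAS AND PROOFS =====

lemma pvGraspStrB_eq : pvGraspStrB = pvGraspStr := rfl
lemma pvReleaseStrB_eq : pvReleaseStrB = pvReleaseStr := rfl

-- the common specification: interleave two action tables
def pvInterleave : List (List String) → List (List String) → List String
  | [], v => v.flatten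
  | x :: u, [] => x ++ pvInterleave u []
  | x :: u, y :: v => x ++ y ++ pvInterleave u v

lemma pvInterleave_nil_right (u : List (List String)) : pvInterleave u [] = u.flatten := by
  induction u with
  | nil => rfl
  | cons x u ih => simp [pvInterleave, ih]

-- A's loop when only one of the tables is (still) indexed
lemma pvFoldOne (w : List (List String)) (acc : List String) :
    (List.range w.length).foldl (fun s k => if k < w.length then s ++ w.getD k [] else s) acc
      = acc ++ w.flatten := by
  induction w generalizing acc with
  | nil => simp
  | cons x w ih =>
    simp only [List.length_cons]
    rw [List.range_succ_eq_map]
    simp only [List.foldl_cons, List.foldl_map, Nat.zero_lt_succ, if_pos,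
      List.getD_cons_zero, List.getD_cons_succ, Nat.succ_lt_succ_iff]
    rw [ih]
    simp

-- A's index-driven loop computes the interleave
lemma pvFoldA (u v : List (List String)) (acc : List String) :
    (List.range (max u.length v.length)).foldl (fun s k =>
        if k < v.length then (if k < u.length then s ++ u.getD k [] else s) ++ v.getD k []
        else (if k < u.length then s ++ u.getD k [] else s)) acc
      = acc ++ pvInterleave u v := by
  induction u generalizing v acc with
  | nil =>
    simp only [List.length_nil, Nat.not_lt_zero, if_false, Nat.max_eq_right (Nat.zero_le _)]
    exact pvFoldOne v acc
  | cons x u ih =>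
    cases v with
    | nil =>
      simp only [List.length_nil, Nat.not_lt_zero, if_false, Nat.max_eq_left (Nat.zero_le _),
        pvInterleave_nil_right]
      exact pvFoldOne (x :: u) acc
    | cons y v =>
      simp only [List.length_cons, Nat.succ_max_succ]
      rw [List.range_succ_eq_map]
      simp only [List.foldl_cons, List.foldl_map, Nat.zero_lt_succ, if_pos,
        List.getD_cons_zero, List.getD_cons_succ, Nat.succ_lt_succ_iff]
      rw [ih]
      simp [pvInterleave]

-- B's zip-then-tails merge computes the interleave
lemma pvFoldB (u v : List (List String)) (acc : List String) :
    ((u.drop (min u.length v.length)).foldl (fun s t => s ++ t)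
        ((u.zip v).foldl (fun s co => s ++ co.1 ++ co.2) acc))
      ++ (v.drop (min u.length v.length)).flatten
      = acc ++ pvInterleave u v := by
  induction u generalizing v acc with
  | nil =>
    simp [pvInterleave]
  | cons x u ih =>
    cases v with
    | nil =>
      simp [PySem.List.foldl_append_eq_flatten, pvInterleave_nil_right]
    | cons y v =>
      simp only [List.length_cons, Nat.succ_min_succ, List.zip_cons_cons, List.foldl_cons,
        List.drop_succ_cons]
      rw [ih]
      simp [pvInterleave]

-- ===== VERDICT (by name: the statement is the Claim_ definition above) =====
theorem generate_robot_action_sequence_spec : Claim_equal_generate_robot_action_sequence := by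
  intro he _dom hpre
  obtain ⟨hc, ho⟩ := hpre
  obtain ⟨c, hcl⟩ := Option.isSome_iff_exists.mp hc
  obtain ⟨o, hol⟩ := Option.isSome_iff_exists.mp ho
  unfold Spec_generate_robot_action_sequence
  unfold generate_robot_action_sequence generate_robot_action_sequence_alt
  rw [hcl, hol]
  simp only [pvGraspStrB_eq, pvReleaseStrB_eq]
  -- B side: slices become drops, the final extend becomes ++ flatten, then pvFoldB
  rw [← Nat.cast_min, PySem.List.slice_from_natCast, PySem.List.slice_from_natCast,
    PySem.List.foldl_append_eq_flatten, pvFoldB]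
  -- A side: the Int range becomes a Nat range, then pvFoldA
  rw [← Nat.cast_max, PySem.List.pyRange_zero_natCast, List.foldl_map]
  have hfun : (fun (seq : List String) (k : Nat) =>
      if (k : Int) < (o.length : Int) then
        (if (k : Int) < (c.length : Int) then
            seq ++ [pvGraspStr (PySem.List.pyGetD c (k : Int) (0, 0))] ++ ["Grasp"] else seq) ++
          [pvReleaseStr (PySem.List.pyGetD o (k : Int) (0, 0))] ++ ["Release"]
      else if (k : Int) < (c.length : Int) then
        seq ++ [pvGraspStr (PySem.List.pyGetD c (k : Int) (0, 0))] ++ ["Grasp"] else seq)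
    = (fun (s : List String) (k : Nat) =>
      if k < (o.map (fun p => [pvReleaseStr p, "Release"])).length then
        (if k < (c.map (fun p => [pvGraspStr p, "Grasp"])).length then
            s ++ (c.map (fun p => [pvGraspStr p, "Grasp"])).getD k [] else s)
          ++ (o.map (fun p => [pvReleaseStr p, "Release"])).getD k []
      else (if k < (c.map (fun p => [pvGraspStr p, "Grasp"])).length then
            s ++ (c.map (fun p => [pvGraspStr p, "Grasp"])).getD k [] else s)) := by
    funext s k
    simp only [List.length_map, Nat.cast_lt, PySem.List.pyGetD_natCast]
    split_ifs with h1 h2 h2 <;>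
      simp_all [List.getElem_map]
  rw [hfun]
  have hlen : max c.length o.length
      = max (c.map (fun p => [pvGraspStr p, "Grasp"])).length
            (o.map (fun p => [pvReleaseStr p, "Release"])).length := by
    simp
  rw [hlen, pvFoldA]
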